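-- pv_equiv track=rewrite | github.com/Betterlol/multi-agent-sql-assistant | src/multi_agent_sql_assistant/agents/generator.py | _choose_sort_column
-- ===== SOURCE A (Python) =====
-- def _choose_sort_column(columns: list[str]) -> str:
--     preferred_patterns = ("amount", "price", "total", "score", "count", "qty", "quantity")
--     for column in columns:
--         lower = column.lower()
--         if any(keyword in lower for keyword in preferred_patterns):
--             return column
--
--     for column in columns:
--         if column.lower() not in {"id", "created_at", "updated_at"}:
--             return column
--
--     return columns[0]
-- ===== SOURCE B (Python) =====
-- def _choose_sort_column(columns: list[str]) -> str:
--     preferred = ("amount", "price", "total", "score", "count", "qty", "quantity")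
--     exclusions = {"id", "created_at", "updated_at"}
--
--     def rank(column: str) -> int:
--         lower = column.lower()
--         if any(keyword in lower for keyword in preferred):
--             return 0
--         if lower not in exclusions:
--             return 1
--         return 2
--
--     return min(columns, key=rank)
-- ===== Notes on version B (the rewrite author's own statement) =====
-- stated objective: simpler
-- what changed: The three sequential early-return scans are replaced by a single rank(column) scoring function and one min-by-key selection, which picks the earliest column of the lowest rank.
import Mathlib
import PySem

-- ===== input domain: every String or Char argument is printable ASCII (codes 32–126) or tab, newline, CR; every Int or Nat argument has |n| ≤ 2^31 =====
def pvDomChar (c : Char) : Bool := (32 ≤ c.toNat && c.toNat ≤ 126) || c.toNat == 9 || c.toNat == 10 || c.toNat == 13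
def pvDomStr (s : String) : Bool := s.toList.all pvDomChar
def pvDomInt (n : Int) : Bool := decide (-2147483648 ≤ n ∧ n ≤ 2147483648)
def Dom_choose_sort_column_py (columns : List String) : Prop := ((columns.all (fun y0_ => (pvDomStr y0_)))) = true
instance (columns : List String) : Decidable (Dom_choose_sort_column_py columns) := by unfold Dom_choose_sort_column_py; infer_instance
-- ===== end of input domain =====

-- B replaces A's three sequential early-return scans by one rank function plus a single
-- min-by-key selection (simpler decomposition, same complexity); equal on nonempty lists
-- (A raises IndexError on [], excluded by Pre_).


-- ===== PORT A =====
-- 'keyword in lower' for each preferred pattern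
def pvPreferred : List String := ["amount", "price", "total", "score", "count", "qty", "quantity"]
def pvExclusions : List String := ["id", "created_at", "updated_at"]

def pvAnyPreferred (lower : String) : Bool :=
  pvPreferred.any (fun keyword => PySem.Str.isIn keyword lower)

-- first for-loop of A: first column whose lowercase contains a preferred keyword
def pvLoop1 : List String → Option String
  | [] => none
  | column :: rest =>
    if pvAnyPreferred (PySem.Str.lower column) then some column else pvLoop1 rest

-- second for-loop of A: first column whose lowercase is not in the exclusion set
def pvLoop2 : List String → Option String
  | [] => none
  | column :: rest =>
    if !(pvExclusions.contains (PySem.Str.lower column)) then some column else pvLoop2 rest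

def choose_sort_column_py (columns : List String) : String :=
  match pvLoop1 columns with
  | some column => column
  | none =>
    match pvLoop2 columns with
    | some column => column
    | none => (PySem.List.pyGet? columns 0).getD ""  -- columns[0]; none (IndexError) outside Pre_

-- ===== PORT B =====
def pvRank (column : String) : Nat :=
  let lower := PySem.Str.lower column
  if pvPreferred.any (fun keyword => PySem.Str.isIn keyword lower) then 0
  else if !(pvExclusions.contains lower) then 1
  else 2

-- min(columns, key=rank): Python keeps the FIRST element of minimal key
def choose_sort_column_py_alt (columns : List String) : String :=
  match columns with
  | [] => ""  -- min() raises ValueError here; outside Pre_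
  | c :: rest => rest.foldl (fun best x => if pvRank x < pvRank best then x else best) c

-- ===== PRECONDITION & SPEC =====
-- Pre_ excludes the empty list, on which A raises IndexError (and B's min raises ValueError).
def Pre_choose_sort_column_py (columns : List String) : Prop := columns ≠ []
instance (columns : List String) : Decidable (Pre_choose_sort_column_py columns) := by
  unfold Pre_choose_sort_column_py; infer_instance

def pvWitness_choose_sort_column_py : List String := ["name"]

def Spec_choose_sort_column_py (columns : List String) (out : String) : Prop := out = choose_sort_column_py_alt columns
instance (columns : List String) (out : String) : Decidable (Spec_choose_sort_column_py columns out) := by unfold Spec_choose_sort_column_py; infer_instance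

-- ===== CLAIM (what is proved, stated in full; the proofs are below) =====
def Claim_equal_choose_sort_column_py : Prop := ∀ (columns : List String), Dom_choose_sort_column_py columns → Pre_choose_sort_column_py columns → Spec_choose_sort_column_py columns (choose_sort_column_py columns)

-- ===== LEMMAS AND PROOFS =====

-- abbreviation for B's fold step
def pvStep (best x : String) : String := if pvRank x < pvRank best then x else best

theorem pvRank_def (s : String) : pvRank s =
    (if pvAnyPreferred (PySem.Str.lower s) then 0
     else if !(pvExclusions.contains (PySem.Str.lower s)) then 1 else 2) := rfl

theorem pvRank_le_two (s : String) : pvRank s ≤ 2 := by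
  rw [pvRank_def]; split_ifs <;> omega

-- none of the three exclusion strings contains a preferred keyword
theorem pvP1_imp_p2 (s : String) (h : pvAnyPreferred (PySem.Str.lower s) = true) :
    pvExclusions.contains (PySem.Str.lower s) = false := by
  by_contra hc
  have hmem : PySem.Str.lower s ∈ pvExclusions := by
    have := Bool.of_not_eq_false hc
    simpa using this
  simp [pvExclusions] at hmem
  rcases hmem with h1 | h1 | h1 <;> rw [h1] at h <;> exact absurd h (by decide)

theorem pvRank_eq_zero_iff (s : String) :
    pvRank s = 0 ↔ pvAnyPreferred (PySem.Str.lower s) = true := by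
  rw [pvRank_def]; split_ifs with h1 h2 <;> simp_all

theorem pvRank_ne_two_iff (s : String) :
    pvRank s ≠ 2 ↔ pvExclusions.contains (PySem.Str.lower s) = false := by
  rw [pvRank_def]; split_ifs with h1 h2
  · simpa using pvP1_imp_p2 s h1
  · simpa using h2
  · simp_all

theorem pvLoop1_eq_find (l : List String) :
    pvLoop1 l = l.find? (fun x => pvRank x == 0) := by
  induction l with
  | nil => rfl
  | cons c rest ih =>
    simp only [pvLoop1, List.find?]
    by_cases h : pvAnyPreferred (PySem.Str.lower c) = true
    · have h0 : pvRank c = 0 := (pvRank_eq_zero_iff c).2 h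
      rw [if_pos h, show (pvRank c == 0) = true by simp [h0]]
    · have h0 : pvRank c ≠ 0 := fun hz => h ((pvRank_eq_zero_iff c).1 hz)
      rw [if_neg h, show (pvRank c == 0) = false by simp [h0]]
      exact ih

theorem pvLoop2_eq_find (l : List String) :
    pvLoop2 l = l.find? (fun x => pvRank x != 2) := by
  induction l with
  | nil => rfl
  | cons c rest ih =>
    simp only [pvLoop2, List.find?]
    by_cases h : pvExclusions.contains (PySem.Str.lower c) = true
    · have h2 : pvRank c = 2 := by
        by_contra hn
        rw [(pvRank_ne_two_iff c).1 hn] at h; exact absurd h (by simp)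
      rw [show (!pvExclusions.contains (PySem.Str.lower c)) = false by rw [h]; rfl,
          show (pvRank c != 2) = false by simp [h2]]
      simpa using ih
    · have hf : pvExclusions.contains (PySem.Str.lower c) = false := by simpa using h
      have h2 : pvRank c ≠ 2 := (pvRank_ne_two_iff c).2 hf
      rw [show (!pvExclusions.contains (PySem.Str.lower c)) = true by rw [hf]; rfl,
          show (pvRank c != 2) = true by simp [h2]]
      simp

-- fold lemmas: behaviour of B's min-by-rank fold for each rank of the accumulator
theorem pvFold_rank0 (l : List String) (c : String) (hc : pvRank c = 0) :
    l.foldl pvStep c = c := by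
  induction l with
  | nil => rfl
  | cons x t ih =>
    have hlt : ¬ pvRank x < pvRank c := by omega
    simpa [pvStep, hlt] using ih

theorem pvFold_rank1 (l : List String) (c : String) (hc : pvRank c = 1) :
    l.foldl pvStep c = (l.find? (fun x => pvRank x == 0)).getD c := by
  induction l generalizing c with
  | nil => rfl
  | cons x t ih =>
    simp only [List.foldl_cons, List.find?]
    by_cases hx : pvRank x = 0
    · have hlt : pvRank x < pvRank c := by omega
      rw [show pvStep c x = x from by simp [pvStep, hlt],
          show (pvRank x == 0) = true by simp [hx]]
      simpa using pvFold_rank0 t x hx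
    · have hlt : ¬ pvRank x < pvRank c := by omega
      rw [show pvStep c x = c from by simp [pvStep, hlt],
          show (pvRank x == 0) = false by simp [hx]]
      exact ih c hc

theorem pvFold_rank2 (l : List String) (c : String) (hc : pvRank c = 2) :
    l.foldl pvStep c =
      match l.find? (fun x => pvRank x == 0) with
      | some t => t
      | none => (l.find? (fun x => pvRank x != 2)).getD c := by
  induction l with
  | nil => rfl
  | cons x t ih =>
    simp only [List.foldl_cons, List.find?]
    by_cases hx0 : pvRank x = 0
    · have hlt : pvRank x < pvRank c := by omega
      rw [show pvStep c x = x from by simp [pvStep, hlt],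
          show (pvRank x == 0) = true by simp [hx0]]
      simpa using pvFold_rank0 t x hx0
    · by_cases hx1 : pvRank x = 1
      · have hlt : pvRank x < pvRank c := by omega
        have hne2 : pvRank x ≠ 2 := by omega
        rw [show pvStep c x = x from by simp [pvStep, hlt],
            show (pvRank x == 0) = false by simp [hx0],
            show (pvRank x != 2) = true by simp [hne2]]
        rw [pvFold_rank1 t x hx1]
        cases t.find? (fun x => pvRank x == 0) <;> simp
      · have hx2 : pvRank x = 2 := by have := pvRank_le_two x; omega
        have hlt : ¬ pvRank x < pvRank c := by omega
        rw [show pvStep c x = c from by simp [pvStep, hlt],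
            show (pvRank x == 0) = false by simp [hx0],
            show (pvRank x != 2) = false by simp [hx2]]
        exact ih

-- ===== VERDICT (by name: the statement is the Claim_ definition above) =====
theorem choose_sort_column_py_spec : Claim_equal_choose_sort_column_py := by
  intro columns _ hpre
  unfold Spec_choose_sort_column_py
  match columns with
  | [] => exact absurd rfl hpre
  | c :: rest =>
    show choose_sort_column_py (c :: rest) = rest.foldl pvStep c
    unfold choose_sort_column_py
    rw [pvLoop1_eq_find, pvLoop2_eq_find]
    by_cases h0 : pvRank c = 0
    · rw [pvFold_rank0 rest c h0]
      simp only [List.find?, show (pvRank c == 0) = true by simp [h0]]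
    · by_cases h1 : pvRank c = 1
      · rw [pvFold_rank1 rest c h1]
        simp only [List.find?,
          show (pvRank c == 0) = false by simp [h0],
          show (pvRank c != 2) = true by simp [h1]]
        cases rest.find? (fun x => pvRank x == 0) <;> simp
      · have h2 : pvRank c = 2 := by have := pvRank_le_two c; omega
        rw [pvFold_rank2 rest c h2]
        simp only [List.find?,
          show (pvRank c == 0) = false by simp [h0],
          show (pvRank c != 2) = false by simp [h2]]
        cases h0' : rest.find? (fun x => pvRank x == 0) with
        | some t => simp
        | none =>
          cases h1' : rest.find? (fun x => pvRank x != 2) <;>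
            simp [PySem.List.pyGet?, PySem.List.pyIdx?]
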